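-- pv_equiv track=rewrite | github.com/doribugi/BOJ | 3090/3090.py | count_cost_make_max_diff
-- ===== SOURCE A (Python) =====
-- def count_cost_make_max_diff(a, diff):
--     tmp = a.copy()
--     count = 0
--     for i in range(len(tmp) - 1):
--         if tmp[i + 1] > tmp[i] + diff:
--             count += tmp[i + 1] - tmp[i] - diff
--             tmp[i + 1] = tmp[i] + diff
--     for i in range(len(tmp) - 1, 0, -1):
--         if tmp[i - 1] > tmp[i] + diff:
--             count += tmp[i - 1] - tmp[i] - diff
--             tmp[i - 1] = tmp[i] + diff
--     return tmp, count
-- ===== SOURCE B (Python) =====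
-- def count_cost_make_max_diff(a, diff):
--     # Reindexing (min-plus) formulation: p[i] = min_{k<=i} (a[k] - k*diff) is a
--     # prefix-min; s[i] = min_{j>=i} (p[j] + 2*j*diff) is a suffix-min; the final
--     # array is s[i] - i*diff and the cost is the total amount removed.
--     n = len(a)
--     p = []
--     for i, x in enumerate(a):
--         c = x - i * diff
--         p.append(c if not p else min(p[-1], c))
--     s = [0] * n
--     for j in range(n - 1, -1, -1):
--         v = p[j] + 2 * j * diff
--         s[j] = v if j == n - 1 else min(v, s[j + 1])
--     final = [s[i] - i * diff for i in range(n)]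
--     return final, sum(x - f for x, f in zip(a, final))
-- ===== Notes on version B (the rewrite author's own statement) =====
-- stated objective: alternative
-- what changed: Replaces A's two in-place clamping passes with incremental cost updates by a min-plus reindexing: a prefix-min of a[k]-k*diff, a suffix-min of p[j]+2*j*diff, an untwist s[i]-i*diff, and the cost computed once as the closed sum of removed amounts.
import Mathlib
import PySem

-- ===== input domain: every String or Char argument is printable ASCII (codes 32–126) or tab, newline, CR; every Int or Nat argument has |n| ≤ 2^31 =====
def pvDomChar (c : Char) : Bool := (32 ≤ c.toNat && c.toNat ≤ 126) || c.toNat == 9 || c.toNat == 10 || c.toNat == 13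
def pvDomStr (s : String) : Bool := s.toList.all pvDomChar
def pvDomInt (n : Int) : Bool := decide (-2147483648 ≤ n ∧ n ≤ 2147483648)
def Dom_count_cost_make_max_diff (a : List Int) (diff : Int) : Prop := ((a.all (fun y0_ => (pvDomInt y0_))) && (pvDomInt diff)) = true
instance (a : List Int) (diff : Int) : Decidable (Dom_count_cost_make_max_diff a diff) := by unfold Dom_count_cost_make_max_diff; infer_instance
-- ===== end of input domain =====

-- B replaces A's two in-place clamping passes (with incremental cost updates) by a min-plus
-- reindexing: prefix-min of a[k]-k*diff, suffix-min of p[j]+2*j*diff, untwist, closed cost sum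
-- (objective: alternative; same O(n) cost; A copies its argument, neither implementation mutates it).

-- ===== PORT A =====
-- body of A's first loop: reads tmp[i], tmp[i+1], possibly sets tmp[i+1]
def stepFwd (diff : Int) (st : List Int × Int) (i : Int) : List Int × Int :=
  let ti := PySem.List.pyGetD st.1 i 0
  let ti1 := PySem.List.pyGetD st.1 (i + 1) 0
  if ti1 > ti + diff then
    (PySem.List.pySetD st.1 (i + 1) (ti + diff), st.2 + (ti1 - ti - diff))
  else st

-- body of A's second loop: reads tmp[i-1], tmp[i], possibly sets tmp[i-1]
def stepBwd (diff : Int) (st : List Int × Int) (i : Int) : List Int × Int :=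
  let ti := PySem.List.pyGetD st.1 i 0
  let tim := PySem.List.pyGetD st.1 (i - 1) 0
  if tim > ti + diff then
    (PySem.List.pySetD st.1 (i - 1) (ti + diff), st.2 + (tim - ti - diff))
  else st

def count_cost_make_max_diff (a : List Int) (diff : Int) : List Int × Int :=
  let tmp := a
  let st1 := (PySem.List.pyRange 0 ((tmp.length : Int) - 1) 1).foldl (stepFwd diff) (tmp, 0)
  (PySem.List.pyRange ((st1.1.length : Int) - 1) 0 (-1)).foldl (stepBwd diff) st1

-- ===== PORT B =====
-- body of B's first loop: p.append(c if not p else min(p[-1], c))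
def stepP (diff : Int) (p : List Int) (ix : Int × Int) : List Int :=
  let c := ix.2 - ix.1 * diff
  p ++ [if p.isEmpty then c else min (PySem.List.pyGetD p (-1) 0) c]

-- body of B's second loop: s[j] = v if j == n - 1 else min(v, s[j+1])
def stepS (diff n : Int) (p : List Int) (s : List Int) (j : Int) : List Int :=
  let v := PySem.List.pyGetD p j 0 + 2 * j * diff
  PySem.List.pySetD s j (if j = n - 1 then v else min v (PySem.List.pyGetD s (j + 1) 0))

def count_cost_make_max_diff_alt (a : List Int) (diff : Int) : List Int × Int :=
  let n : Int := a.length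
  let p := (PySem.List.enumerate a 0).foldl (stepP diff) []
  let s := (PySem.List.pyRange (n - 1) (-1) (-1)).foldl (stepS diff n p) (List.replicate a.length 0)
  let final := (PySem.List.pyRange 0 n 1).map (fun i => PySem.List.pyGetD s i 0 - i * diff)
  (final, (a.zip final).foldl (fun acc q => acc + (q.1 - q.2)) 0)

-- ===== PRECONDITION & SPEC =====
def Spec_count_cost_make_max_diff (a : List Int) (diff : Int) (out : List Int × Int) : Prop := out = count_cost_make_max_diff_alt a diff
instance (a : List Int) (diff : Int) (out : List Int × Int) : Decidable (Spec_count_cost_make_max_diff a diff out) := by unfold Spec_count_cost_make_max_diff; infer_instance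

-- ===== CLAIM (what is proved, stated in full; the proofs are below) =====
def Claim_equal_count_cost_make_max_diff : Prop := ∀ (a : List Int) (diff : Int), Dom_count_cost_make_max_diff a diff → Spec_count_cost_make_max_diff a diff (count_cost_make_max_diff a diff)

-- ===== LEMMAS AND PROOFS =====

-- functional clamping scan: scanC diff prev xs is A's forward pass on xs with previous value prev
def scanC (diff prev : Int) : List Int → List Int
  | [] => []
  | x :: xs =>
    let y := if x > prev + diff then prev + diff else x
    y :: scanC diff y xs

def scan1 (diff : Int) : List Int → List Int
  | [] => []
  | x :: xs => x :: scanC diff x xs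

-- subtract i*diff with index running up from i
def detw (diff : Int) : Int → List Int → List Int
  | _, [] => []
  | i, y :: ys => (y - i * diff) :: detw diff (i + 1) ys

-- add 2*i*diff with index running up from i
def tw2 (diff : Int) : Int → List Int → List Int
  | _, [] => []
  | i, y :: ys => (y + 2 * i * diff) :: tw2 diff (i + 1) ys

-- suffix minima
def rmin : List Int → List Int
  | [] => []
  | x :: xs =>
    match rmin xs with
    | [] => [x]
    | y :: ys => min x y :: y :: ys

-- right-to-left clamping scan
def rstep (diff : Int) : List Int → List Int
  | [] => []
  | x :: xs =>
    match rstep diff xs with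
    | [] => [x]
    | y :: ys => (if x > y + diff then y + diff else x) :: y :: ys

@[simp] lemma scanC_length (diff prev : Int) (xs : List Int) :
    (scanC diff prev xs).length = xs.length := by
  induction xs generalizing prev with
  | nil => rfl
  | cons x xs ih => simp [scanC, ih]

@[simp] lemma scan1_length (diff : Int) (xs : List Int) :
    (scan1 diff xs).length = xs.length := by
  cases xs <;> simp [scan1]

@[simp] lemma detw_length (diff i : Int) (xs : List Int) :
    (detw diff i xs).length = xs.length := by
  induction xs generalizing i with
  | nil => rfl
  | cons x xs ih => simp [detw, ih]

@[simp] lemma tw2_length (diff i : Int) (xs : List Int) :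
    (tw2 diff i xs).length = xs.length := by
  induction xs generalizing i with
  | nil => rfl
  | cons x xs ih => simp [tw2, ih]

@[simp] lemma rmin_length (xs : List Int) : (rmin xs).length = xs.length := by
  induction xs with
  | nil => rfl
  | cons x xs ih =>
    cases h : rmin xs with
    | nil =>
      have hx := ih
      rw [h] at hx; simp at hx
      simp [rmin, h, hx]
    | cons y ys => simp [rmin, h]; rw [h] at ih; simpa using ih

-- x at index pre.length
lemma getD_append_length (pre : List Int) (x : Int) (rest : List Int) (d : Int) :
    (pre ++ x :: rest).getD pre.length d = x := by
  induction pre with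
  | nil => rfl
  | cons p pre ih => simpa using ih

lemma set_append_length (pre : List Int) (x : Int) (rest : List Int) (v : Int) :
    (pre ++ x :: rest).set pre.length v = pre ++ v :: rest := by
  induction pre with
  | nil => rfl
  | cons p pre ih => simpa using ih

-- ===== A-side characterisation =====

lemma fwdA (diff : Int) : ∀ (rest pre' : List Int) (p c : Int),
    (PySem.List.pyRange (pre'.length : Int) ((pre'.length : Int) + (rest.length : Int)) 1).foldl
        (stepFwd diff) (pre' ++ p :: rest, c)
    = (pre' ++ p :: scanC diff p rest, c + (rest.sum - (scanC diff p rest).sum)) := by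
  intro rest
  induction rest with
  | nil =>
    intro pre' p c
    rw [PySem.List.pyRange_one_eq_nil (by simp)]
    simp [scanC]
  | cons x rest' ih =>
    intro pre' p c
    rw [PySem.List.pyRange_one_cons (by simp only [List.length_cons]; push_cast; omega)]
    have hget1 : PySem.List.pyGetD (pre' ++ p :: x :: rest') (pre'.length : Int) 0 = p := by
      rw [PySem.List.pyGetD_natCast, getD_append_length]
    have hcast : ((pre'.length : Int) + 1) = (((pre' ++ [p]).length : Int)) := by push_cast; simp
    have hget2 : PySem.List.pyGetD (pre' ++ p :: x :: rest') ((pre'.length : Int) + 1) 0 = x := by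
      rw [hcast, PySem.List.pyGetD_natCast]
      have : pre' ++ p :: x :: rest' = (pre' ++ [p]) ++ x :: rest' := by simp
      rw [this, getD_append_length]
    simp only [List.foldl_cons]
    by_cases hb : x > p + diff
    · have hstep : stepFwd diff (pre' ++ p :: x :: rest', c) (pre'.length : Int)
          = ((pre' ++ [p]) ++ (p + diff) :: rest', c + (x - p - diff)) := by
        simp only [stepFwd, hget1, hget2]
        rw [if_pos hb, hcast, PySem.List.pySetD_natCast]
        have : pre' ++ p :: x :: rest' = (pre' ++ [p]) ++ x :: rest' := by simp
        rw [this, set_append_length]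
      rw [hstep]
      have hb2 : ((pre'.length : Int) + ((x :: rest').length : Int)) =
          (((pre' ++ [p]).length : Int) + (rest'.length : Int)) := by push_cast; simp; omega
      rw [hb2, hcast, ih]
      simp only [scanC]
      rw [if_pos hb]
      rw [Prod.mk.injEq]
      exact ⟨by simp, by simp; try ring⟩
    · have hstep : stepFwd diff (pre' ++ p :: x :: rest', c) (pre'.length : Int)
          = ((pre' ++ [p]) ++ x :: rest', c) := by
        simp only [stepFwd, hget1, hget2]
        rw [if_neg hb]
        simp
      rw [hstep]
      have hb2 : ((pre'.length : Int) + ((x :: rest').length : Int)) =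
          (((pre' ++ [p]).length : Int) + (rest'.length : Int)) := by push_cast; simp; omega
      rw [hb2, hcast, ih]
      simp only [scanC]
      rw [if_neg hb]
      rw [Prod.mk.injEq]
      exact ⟨by simp, by simp; try ring⟩

lemma bwdA (diff : Int) : ∀ (fr : List Int) (d : Int) (done : List Int) (c : Int),
    (PySem.List.pyRange (fr.length : Int) 0 (-1)).foldl (stepBwd diff) (fr.reverse ++ d :: done, c)
    = ((scanC diff d fr).reverse ++ d :: done, c + (fr.sum - (scanC diff d fr).sum)) := by
  intro fr
  induction fr with
  | nil =>
    intro d done c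
    rw [PySem.List.pyRange_neg_one_eq_nil (by simp)]
    simp [scanC]
  | cons q fr' ih =>
    intro d done c
    rw [PySem.List.pyRange_neg_one_cons (by simp only [List.length_cons]; push_cast; omega)]
    have hsh : (q :: fr').reverse ++ d :: done = (fr'.reverse ++ [q]) ++ d :: done := by simp
    have hlen : (((q :: fr').length : Int)) = (((fr'.reverse ++ [q]).length : Int)) := by
      push_cast; simp
    have hget1 : PySem.List.pyGetD ((fr'.reverse ++ [q]) ++ d :: done) (((q :: fr').length : Int)) 0 = d := by
      rw [hlen, PySem.List.pyGetD_natCast, getD_append_length]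
    have hlen2 : (((q :: fr').length : Int) - 1) = ((fr'.reverse.length : Int)) := by push_cast; simp
    have hget2 : PySem.List.pyGetD ((fr'.reverse ++ [q]) ++ d :: done) (((q :: fr').length : Int) - 1) 0 = q := by
      rw [hlen2, PySem.List.pyGetD_natCast]
      have : (fr'.reverse ++ [q]) ++ d :: done = fr'.reverse ++ q :: d :: done := by simp
      rw [this, getD_append_length]
    simp only [List.foldl_cons, hsh]
    have hrange : ((q :: fr').length : Int) - 1 = ((fr'.length : Int)) := by push_cast; simp
    by_cases hb : q > d + diff
    · have hstep : stepBwd diff ((fr'.reverse ++ [q]) ++ d :: done, c) (((q :: fr').length : Int))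
          = (fr'.reverse ++ (d + diff) :: d :: done, c + (q - d - diff)) := by
        simp only [stepBwd, hget1, hget2]
        rw [if_pos hb, hlen2, PySem.List.pySetD_natCast]
        have : (fr'.reverse ++ [q]) ++ d :: done = fr'.reverse ++ q :: d :: done := by simp
        rw [this, set_append_length]
      rw [hstep, hrange, ih]
      simp only [scanC]
      rw [if_pos hb]
      rw [Prod.mk.injEq]
      exact ⟨by simp, by simp; try ring⟩
    · have hstep : stepBwd diff ((fr'.reverse ++ [q]) ++ d :: done, c) (((q :: fr').length : Int))
          = (fr'.reverse ++ q :: d :: done, c) := by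
        simp only [stepBwd, hget1, hget2]
        rw [if_neg hb]
        simp
      rw [hstep, hrange, ih]
      simp only [scanC]
      rw [if_neg hb]
      rw [Prod.mk.injEq]
      exact ⟨by simp, by simp; try ring⟩

-- ===== B-side characterisation =====

lemma pfoldB (diff : Int) : ∀ (xs : List Int) (i prev : Int) (acc : List Int) (h : acc ≠ []),
    acc.getLast h = prev - i * diff →
    (PySem.List.enumerate xs (i + 1)).foldl (stepP diff) acc
      = acc ++ detw diff (i + 1) (scanC diff prev xs) := by
  intro xs
  induction xs with
  | nil => intro i prev acc h hl; simp [PySem.List.enumerate_nil, detw, scanC]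
  | cons x xs' ih =>
    intro i prev acc h hl
    rw [PySem.List.enumerate_cons]
    simp only [List.foldl_cons]
    have hne : acc.isEmpty = false := by simpa [List.isEmpty_iff] using h
    have hstep : stepP diff acc (i + 1, x)
        = acc ++ [(if x > prev + diff then prev + diff else x) - (i + 1) * diff] := by
      simp only [stepP, hne, Bool.false_eq_true, if_false]
      rw [PySem.List.pyGetD_neg_one acc 0 h, hl]
      congr 1
      have : prev - i * diff = (prev + diff) - (i + 1) * diff := by ring
      rw [this]
      rcases le_total (x - (i + 1) * diff) ((prev + diff) - (i + 1) * diff) with hle | hle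
      · rw [min_eq_right hle]
        have : ¬ x > prev + diff := by omega
        simp [this]
      · rw [min_eq_left hle]
        by_cases hgt : x > prev + diff
        · simp [hgt]
        · have : x = prev + diff := by omega
          simp [this]
    rw [hstep]
    set y := if x > prev + diff then prev + diff else x with hy
    have h2 : (acc ++ [y - (i + 1) * diff]) ≠ [] := by simp
    have hl2 : (acc ++ [y - (i + 1) * diff]).getLast h2 = y - (i + 1) * diff := by
      simp
    rw [ih (i + 1) y _ h2 hl2]
    simp only [scanC, detw, ← hy]
    simp

lemma set_replicate_append (n : Nat) (x : Int) (rest : List Int) (v : Int) :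
    (List.replicate n (0 : Int) ++ x :: rest).set n v = List.replicate n 0 ++ v :: rest := by
  have h := set_append_length (List.replicate n (0 : Int)) x rest v
  simpa using h

lemma getD_replicate_append (n : Nat) (x : Int) (rest : List Int) (d : Int) :
    (List.replicate n (0 : Int) ++ x :: rest).getD n d = x := by
  have h := getD_append_length (List.replicate n (0 : Int)) x rest d
  simpa using h

lemma sfoldB (diff : Int) (p : List Int) : ∀ (prr psuf : List Int), p = prr.reverse ++ psuf →
    (PySem.List.pyRange ((prr.length : Int) - 1) (-1) (-1)).foldl (stepS diff (p.length : Int) p)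
        (List.replicate prr.length 0 ++ rmin (tw2 diff (prr.length : Int) psuf))
    = rmin (tw2 diff 0 p) := by
  intro prr
  induction prr with
  | nil =>
    intro psuf hp
    rw [PySem.List.pyRange_neg_one_eq_nil (by simp)]
    simp [hp]
  | cons q prr' ih =>
    intro psuf hp
    rw [PySem.List.pyRange_neg_one_cons (by simp only [List.length_cons]; push_cast; omega)]
    simp only [List.foldl_cons]
    have hp' : p = prr'.reverse ++ q :: psuf := by simpa using hp
    have h1 : (((q :: prr').length : Int) - 1) = ((prr'.length : Int)) := by
      simp only [List.length_cons]; push_cast; ring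
    have hgq : PySem.List.pyGetD p (((q :: prr').length : Int) - 1) 0 = q := by
      rw [h1]
      have h2 : (prr'.length : Int) = ((prr'.reverse.length : Int)) := by simp
      rw [h2, PySem.List.pyGetD_natCast, hp', getD_append_length]
    have hlenp : p.length = prr'.length + 1 + psuf.length := by
      rw [hp']; simp; omega
    cases psuf with
    | nil =>
      -- last index: the j = n-1 branch fires
      have hcond : (((q :: prr').length : Int) - 1) = ((p.length : Int)) - 1 := by
        simp [hlenp]
      have hstep : stepS diff (p.length : Int) p
            (List.replicate (q :: prr').length 0 ++ rmin (tw2 diff ((q :: prr').length : Int) []))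
            (((q :: prr').length : Int) - 1)
          = List.replicate prr'.length 0
              ++ rmin (tw2 diff (prr'.length : Int) [q]) := by
        simp only [stepS]
        rw [if_pos hcond, hgq, h1, PySem.List.pySetD_natCast]
        have h2 : List.replicate (q :: prr').length (0 : Int) ++ rmin (tw2 diff ((q :: prr').length : Int) [])
            = List.replicate prr'.length 0 ++ (0 : Int) :: [] := by
          simp [tw2, rmin, List.replicate_succ']
        rw [h2, set_replicate_append]
        simp [tw2, rmin]
      rw [hstep]
      have h3 : (((q :: prr').length : Int) - 1 - 1) = ((prr'.length : Int) - 1) := by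
        simp only [List.length_cons]; push_cast; ring
      rw [h3, ih [q] hp']
    | cons z psuf' =>
      -- interior index: s[j] = min(v, s[j+1])
      have hcond : ¬ ((((q :: prr').length : Int) - 1) = ((p.length : Int)) - 1) := by
        simp only [List.length_cons, hlenp]; push_cast; omega
      have hσne : rmin (tw2 diff (((q :: prr').length : Int)) (z :: psuf')) ≠ [] := by
        intro hnil
        have hl := congrArg List.length hnil
        simp at hl
      obtain ⟨w, σ', hσ⟩ := List.exists_cons_of_ne_nil hσne
      have hgs : PySem.List.pyGetD
          (List.replicate (q :: prr').length 0 ++ rmin (tw2 diff ((q :: prr').length : Int) (z :: psuf')))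
          ((((q :: prr').length : Int) - 1) + 1) 0 = w := by
        have h4 : ((((q :: prr').length : Int) - 1) + 1) = (((q :: prr').length : Int)) := by ring
        rw [h4, PySem.List.pyGetD_natCast, hσ, getD_replicate_append]
      have hstep : stepS diff (p.length : Int) p
            (List.replicate (q :: prr').length 0 ++ rmin (tw2 diff ((q :: prr').length : Int) (z :: psuf')))
            (((q :: prr').length : Int) - 1)
          = List.replicate prr'.length 0
              ++ rmin (tw2 diff (prr'.length : Int) (q :: z :: psuf')) := by
        simp only [stepS]
        rw [if_neg hcond, hgq, hgs, h1, PySem.List.pySetD_natCast]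
        have h2 : List.replicate (q :: prr').length (0 : Int) ++ rmin (tw2 diff ((q :: prr').length : Int) (z :: psuf'))
            = List.replicate prr'.length 0 ++ (0 : Int) :: (w :: σ') := by
          rw [hσ]; simp [List.replicate_succ']
        rw [h2, set_replicate_append]
        have hc : (((q :: prr').length : Int)) = ((prr'.length : Int)) + 1 := by
          simp only [List.length_cons]; push_cast; ring
        rw [hc] at hσ
        have h5 : tw2 diff ((prr'.length : Int)) (q :: z :: psuf')
            = (q + 2 * ((prr'.length : Int)) * diff)
              :: tw2 diff ((prr'.length : Int) + 1) (z :: psuf') := by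
          simp [tw2]
        rw [h5]
        simp only [rmin]
        rw [hσ]
      rw [hstep]
      have h3 : (((q :: prr').length : Int) - 1 - 1) = ((prr'.length : Int) - 1) := by
        simp only [List.length_cons]; push_cast; ring
      rw [h3, ih (q :: z :: psuf') hp']

lemma mapRangeB (diff : Int) : ∀ (s pre : List Int),
    (PySem.List.pyRange (pre.length : Int) ((pre.length : Int) + (s.length : Int)) 1).map
        (fun i => PySem.List.pyGetD (pre ++ s) i 0 - i * diff)
    = detw diff (pre.length : Int) s := by
  intro s
  induction s with
  | nil =>
    intro pre
    rw [PySem.List.pyRange_one_eq_nil (by simp)]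
    simp [detw]
  | cons x s' ih =>
    intro pre
    rw [PySem.List.pyRange_one_cons (by simp only [List.length_cons]; push_cast; omega)]
    simp only [List.map_cons]
    have hget : PySem.List.pyGetD (pre ++ x :: s') ((pre.length : Int)) 0 = x := by
      rw [PySem.List.pyGetD_natCast, getD_append_length]
    have hcast : ((pre.length : Int) + 1) = (((pre ++ [x]).length : Int)) := by push_cast; simp
    have hb2 : ((pre.length : Int) + ((x :: s').length : Int)) =
        (((pre ++ [x]).length : Int) + (s'.length : Int)) := by push_cast; simp; omega
    have hsh : pre ++ x :: s' = (pre ++ [x]) ++ s' := by simp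
    rw [hget, hb2, hcast, hsh, ih (pre ++ [x])]
    simp only [detw]
    rw [← hcast]

-- ===== the pure combinatorial core =====

lemma main1 (diff : Int) : ∀ (L : List Int) (i : Int),
    detw diff i (rmin (tw2 diff i (detw diff i L))) = rstep diff L := by
  intro L
  induction L with
  | nil => intro i; simp [detw, tw2, rmin, rstep]
  | cons x L' ih =>
    intro i
    simp only [detw, tw2, rstep]
    have hxi : x - i * diff + 2 * i * diff = x + i * diff := by ring
    rw [hxi]
    cases hys : rmin (tw2 diff (i + 1) (detw diff (i + 1) L')) with
    | nil =>
      have hlen := congrArg List.length hys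
      simp at hlen
      subst hlen
      simp [detw, tw2, rmin, rstep]
      try ring
    | cons y ys =>
      have hIH := ih (i + 1)
      rw [hys] at hIH
      simp only [detw] at hIH
      simp only [rmin]
      rw [hys, ← hIH]
      simp only [detw]
      congr 1
      have harith : y - (i + 1) * diff + diff = y - i * diff := by ring
      rw [harith]
      set t := i * diff with ht
      rcases le_total (x + t) y with hle | hle
      · rw [min_eq_left hle]
        have hng : ¬ x > y - t := by omega
        rw [if_neg hng]
        ring
      · rw [min_eq_right hle]
        by_cases hgt : x > y - t
        · rw [if_pos hgt]
        · have hxy : x = y - t := by omega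
          rw [if_neg hgt]
          omega

@[simp] lemma rstep_length (diff : Int) (L : List Int) : (rstep diff L).length = L.length := by
  induction L with
  | nil => rfl
  | cons x L' ih =>
    cases h : rstep diff L' with
    | nil =>
      have hx := ih
      rw [h] at hx; simp at hx
      simp [rstep, h, hx]
    | cons y ys =>
      rw [h] at ih
      simp [rstep, h]
      simpa using ih

lemma scanC_snoc (diff : Int) : ∀ (ys : List Int) (prev x : Int),
    scanC diff prev (ys ++ [x])
    = scanC diff prev ys
      ++ [if x > ((scanC diff prev ys).getLastD prev) + diff
          then ((scanC diff prev ys).getLastD prev) + diff else x] := by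
  intro ys
  induction ys with
  | nil => intro prev x; simp [scanC]
  | cons u uu ih =>
    intro prev x
    simp only [List.cons_append, scanC, List.getLastD_cons]
    rw [ih]

lemma rstep_rev (diff : Int) : ∀ (L : List Int),
    rstep diff L = (scan1 diff L.reverse).reverse := by
  intro L
  induction L with
  | nil => simp [rstep, scan1]
  | cons x L' ih =>
    cases hL : L' with
    | nil => simp [rstep, scan1, scanC]
    | cons z w =>
      rw [← hL]
      have hrevne : L'.reverse ≠ [] := by simp [hL]
      obtain ⟨zz, ww, hzw⟩ := List.exists_cons_of_ne_nil hrevne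
      have hne : rstep diff L' ≠ [] := by
        intro hnil
        have hl := congrArg List.length hnil
        rw [rstep_length] at hl
        simp [hL] at hl
      obtain ⟨y, ys, hys⟩ := List.exists_cons_of_ne_nil hne
      have hrev : scan1 diff L'.reverse = ys.reverse ++ [y] := by
        have h2 : (scan1 diff L'.reverse).reverse = y :: ys := by rw [← ih, hys]
        calc scan1 diff L'.reverse = ((scan1 diff L'.reverse).reverse).reverse := by simp
          _ = (y :: ys).reverse := by rw [h2]
          _ = ys.reverse ++ [y] := by simp
      have h1 : zz :: scanC diff zz ww = ys.reverse ++ [y] := by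
        rw [← hrev, hzw, scan1]
      have hlast : (scanC diff zz ww).getLastD zz = y := by
        have h3 := congrArg (fun l : List Int => l.getLastD 0) h1
        simp only [List.getLastD_cons] at h3
        rw [h3]
        simp [List.getLastD_eq_getLast?, List.getLast?_concat]
      have hxrev : (x :: L').reverse = zz :: (ww ++ [x]) := by
        rw [List.reverse_cons, hzw]; simp
      simp only [rstep]
      rw [hys, hxrev]
      simp only [scan1]
      rw [scanC_snoc, hlast]
      have h4 : zz :: (scanC diff zz ww ++ [if x > y + diff then y + diff else x])
          = (zz :: scanC diff zz ww) ++ [if x > y + diff then y + diff else x] := by simp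
      rw [h4, List.reverse_append, h1]
      simp

lemma zipsum : ∀ (xs ys : List Int) (c : Int), xs.length = ys.length →
    (xs.zip ys).foldl (fun acc q => acc + (q.1 - q.2)) c = c + (xs.sum - ys.sum) := by
  intro xs
  induction xs with
  | nil =>
    intro ys c h
    cases ys with
    | nil => simp
    | cons y ys => simp at h
  | cons x xs ih =>
    intro ys c h
    cases ys with
    | nil => simp at h
    | cons y ys =>
      simp only [List.zip_cons_cons, List.foldl_cons, List.sum_cons]
      rw [ih ys (c + (x - y)) (by simpa using h)]
      ring

-- final assembly
theorem equal_all (a : List Int) (diff : Int) :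
    count_cost_make_max_diff a diff = count_cost_make_max_diff_alt a diff := by
  cases a with
  | nil => rfl
  | cons x xs =>
    -- ---- A side: forward pass then backward pass ----
    have hA1 := fwdA diff xs [] x 0
    simp only [List.length_nil, Nat.cast_zero, zero_add, List.nil_append] at hA1
    rcases List.eq_nil_or_concat (x :: scanC diff x xs) with hnil | ⟨ys, y, hL⟩
    · simp at hnil
    rw [List.concat_eq_append] at hL
    have hA2 := bwdA diff ys.reverse y [] (xs.sum - (scanC diff x xs).sum)
    simp only [List.reverse_reverse, List.length_reverse] at hA2
    have hAval : count_cost_make_max_diff (x :: xs) diff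
        = ((scanC diff y ys.reverse).reverse ++ [y],
           xs.sum - (scanC diff x xs).sum + (ys.reverse.sum - (scanC diff y ys.reverse).sum)) := by
      simp only [count_cost_make_max_diff]
      have hb : (((x :: xs).length : Int)) - 1 = ((xs.length : Int)) := by
        simp only [List.length_cons]; push_cast; ring
      rw [hb, hA1, hL]
      rw [show ((ys ++ [y] : List Int), xs.sum - (scanC diff x xs).sum).1 = (ys ++ [y] : List Int) from rfl]
      have hb2 : ((((ys ++ [y]) : List Int).length : Int)) - 1 = ((ys.length : Int)) := by
        simp only [List.length_append, List.length_cons, List.length_nil]; push_cast; ring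
      rw [hb2, hA2]
    -- ---- B side ----
    set L := x :: scanC diff x xs with hLdef
    have hp : (PySem.List.enumerate (x :: xs) 0).foldl (stepP diff) []
        = detw diff 0 L := by
      rw [PySem.List.enumerate_cons]
      simp only [List.foldl_cons]
      have hs0 : stepP diff [] (0, x) = [x - 0 * diff] := by simp [stepP]
      rw [hs0]
      have hfa := pfoldB diff xs 0 x [x - 0 * diff] (by simp) (by simp)
      rw [hfa]
      simp [detw, hLdef]
    rw [hAval]
    simp only [count_cost_make_max_diff_alt]
    rw [hp]
    -- the s loop
    have hdlen : (detw diff 0 L).length = (x :: xs).length := by simp [hLdef]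
    have hsf := sfoldB diff (detw diff 0 L) (detw diff 0 L).reverse [] (by simp)
    simp only [List.length_reverse, tw2, rmin, List.append_nil] at hsf
    rw [hdlen] at hsf
    rw [hsf]
    -- the final comprehension
    have hslen : (rmin (tw2 diff 0 (detw diff 0 L))).length = (x :: xs).length := by
      simp [hLdef]
    have hmr := mapRangeB diff (rmin (tw2 diff 0 (detw diff 0 L))) []
    simp only [List.length_nil, Nat.cast_zero, zero_add, List.nil_append] at hmr
    rw [hslen] at hmr
    rw [hmr]
    have hfinal : detw diff 0 (rmin (tw2 diff 0 (detw diff 0 L)))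
        = (scanC diff y ys.reverse).reverse ++ [y] := by
      rw [main1, rstep_rev, hL, List.reverse_append]
      simp [scan1]
    rw [hfinal]
    -- the cost sum
    have hfl : (x :: xs).length = ((scanC diff y ys.reverse).reverse ++ [y]).length := by
      have h7 := congrArg List.length hL
      simp [hLdef] at h7
      simp
      omega
    rw [zipsum _ _ _ hfl]
    rw [Prod.mk.injEq]
    refine ⟨rfl, ?_⟩
    have hsum2 : x + (scanC diff x xs).sum = ys.sum + y := by
      have h5 := congrArg List.sum (hLdef.symm.trans hL)
      simpa using h5
    simp only [List.sum_cons, List.sum_append, List.sum_reverse, List.sum_nil]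
    linarith [hsum2]

-- ===== VERDICT (by name: the statement is the Claim_ definition above) =====
theorem count_cost_make_max_diff_spec : Claim_equal_count_cost_make_max_diff := by
  intro a diff _
  unfold Spec_count_cost_make_max_diff
  exact equal_all a diff
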